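-- pv_equiv track=rewrite | github.com/UnsafePointer/whiteboard.py | solutions/opposite_numbers.py | solution
-- ===== SOURCE A (Python) =====
-- from typing import List, Set
--
-- def solution(A: List[int]) -> int:
--     count: Set[int] = set()
--     largest = 0
--     for n in A:
--         if n > 0 and (0 - n) in count and n > largest:
--             largest = n
--         elif n < 0 and abs(n) in count and abs(n) > largest:
--             largest = abs(n)
--         count.add(n)
--     return largest
-- ===== SOURCE B (Python) =====
-- def solution(A):
--     vals = sorted(set(A))
--     i, j = 0, len(vals) - 1
--     while i < j:
--         s = vals[i] + vals[j]
--         if s == 0: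
--             return vals[j]
--         if s < 0:
--             i += 1
--         else:
--             j -= 1
--     return 0
-- ===== Notes on version B (the rewrite author's own statement) =====
-- stated objective: alternative
-- what changed: Replaces the hash-set single pass (membership test per element, running max) with sort-the-distinct-values and a classic two-pointer scan from both ends looking for a pair summing to zero; correct because the first zero-sum pair found has the largest matchable positive value.
import Mathlib
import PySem

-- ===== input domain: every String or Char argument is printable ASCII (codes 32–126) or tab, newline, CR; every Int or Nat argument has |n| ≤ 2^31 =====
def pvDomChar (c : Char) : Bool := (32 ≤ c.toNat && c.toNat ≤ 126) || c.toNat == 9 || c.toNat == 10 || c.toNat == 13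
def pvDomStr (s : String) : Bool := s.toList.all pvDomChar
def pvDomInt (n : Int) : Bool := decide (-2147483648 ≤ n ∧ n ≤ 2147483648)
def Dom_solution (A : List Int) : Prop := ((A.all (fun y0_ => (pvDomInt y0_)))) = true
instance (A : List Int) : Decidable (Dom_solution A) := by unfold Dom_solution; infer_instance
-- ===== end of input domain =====

-- B replaces the hash-set single pass with sort-the-distinct-values + a two-pointer scan from both ends (alternative algorithm; no speed claim).


-- ===== PORT A =====
-- single pass: set of seen elements + running largest
def solutionStep (st : PySem.Set Int × Int) (n : Int) : PySem.Set Int × Int :=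
  if n > 0 ∧ (0 - n) ∈ st.1 ∧ n > st.2 then (PySem.Set.add st.1 n, n)
  else if n < 0 ∧ |n| ∈ st.1 ∧ |n| > st.2 then (PySem.Set.add st.1 n, |n|)
  else (PySem.Set.add st.1 n, st.2)

def solution (A : List Int) : Int :=
  (A.foldl solutionStep (PySem.Set.empty, 0)).2

-- ===== PORT B =====
-- two-pointer scan over the sorted distinct values, looking for a pair summing to 0
def twoPtr (vals : List Int) (i j : Nat) : Int :=
  if _ : i < j then
    let s := vals.getD i 0 + vals.getD j 0
    if s = 0 then vals.getD j 0
    else if s < 0 then twoPtr vals (i+1) j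
    else twoPtr vals i (j-1)
  else 0
termination_by j - i
decreasing_by all_goals omega

def solution_alt (A : List Int) : Int :=
  let vals := PySem.List.sorted (PySem.Set.ofList A) (fun x => x) false
  twoPtr vals 0 (vals.length - 1)

-- ===== PRECONDITION & SPEC =====
def Spec_solution (A : List Int) (out : Int) : Prop := out = solution_alt A
instance (A : List Int) (out : Int) : Decidable (Spec_solution A out) := by unfold Spec_solution; infer_instance

-- ===== CLAIM (what is proved, stated in full; the proofs are below) =====
def Claim_equal_solution : Prop := ∀ (A : List Int), Dom_solution A → Spec_solution A (solution A)

-- ===== LEMMAS AND PROOFS =====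

-- r is "the" answer for list l: nonnegative, attained by a pair (or 0), and an upper bound over all pairs
def GoodAns (l : List Int) (r : Int) : Prop :=
  0 ≤ r ∧ (r = 0 ∨ ∃ n, n ∈ l ∧ n ≠ 0 ∧ -n ∈ l ∧ r = |n|) ∧
  (∀ n, n ∈ l → n ≠ 0 → -n ∈ l → |n| ≤ r)

theorem goodAns_unique {l : List Int} {r₁ r₂ : Int}
    (h₁ : GoodAns l r₁) (h₂ : GoodAns l r₂) : r₁ = r₂ := by
  obtain ⟨n₁, e₁, u₁⟩ := h₁
  obtain ⟨n₂, e₂, u₂⟩ := h₂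
  have le₁ : r₁ ≤ r₂ := by
    rcases e₁ with h | ⟨n, hn, h0, hneg, hr⟩
    · omega
    · subst hr; exact u₂ n hn h0 hneg
  have le₂ : r₂ ≤ r₁ := by
    rcases e₂ with h | ⟨n, hn, h0, hneg, hr⟩
    · omega
    · subst hr; exact u₁ n hn h0 hneg
  omega

theorem goodAns_congr {l l' : List Int} {r : Int}
    (hm : ∀ m, m ∈ l ↔ m ∈ l') (hg : GoodAns l r) : GoodAns l' r := by
  obtain ⟨h0, he, hu⟩ := hg
  refine ⟨h0, ?_, ?_⟩
  · rcases he with h | ⟨n, hn, hn0, hneg, hr⟩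
    · exact Or.inl h
    · exact Or.inr ⟨n, (hm n).mp hn, hn0, (hm (-n)).mp hneg, hr⟩
  · intro n h1 h2 h3
    exact hu n ((hm n).mpr h1) h2 ((hm (-n)).mpr h3)

-- ---- A-side: the fold maintains GoodAns over the prefix ----

theorem goodAns_step {pre : List Int} {count : PySem.Set Int} {largest : Int} (n : Int)
    (hmem : ∀ m, m ∈ count ↔ m ∈ pre) (hg : GoodAns pre largest) :
    (∀ m, m ∈ (solutionStep (count, largest) n).1 ↔ m ∈ pre ++ [n]) ∧
    GoodAns (pre ++ [n]) (solutionStep (count, largest) n).2 := by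
  obtain ⟨hpos, hex, hub⟩ := hg
  have hmem' : ∀ m, m ∈ PySem.Set.add count n ↔ m ∈ pre ++ [n] := by
    intro m
    simp [PySem.Set.mem_add, hmem m]
  unfold solutionStep
  split_ifs with h1 h2
  · -- n > 0, -n previously seen, n new max
    obtain ⟨hn, hc, hl⟩ := h1
    have hnegpre : -n ∈ pre := by have := (hmem (0 - n)).mp hc; simpa using this
    refine ⟨hmem', le_of_lt hn, Or.inr ⟨n, by simp, by omega, by simp [hnegpre], (abs_of_pos hn).symm⟩, ?_⟩
    intro m hm hm0 hmneg
    simp only [List.mem_append, List.mem_singleton] at hm hmneg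
    rcases hm with hm | hm
    · rcases hmneg with hmn | hmn
      · have := hub m hm hm0 hmn; omega
      · have : m = -n := by omega
        subst this; rw [abs_neg, abs_of_pos hn]
    · subst hm; rw [abs_of_pos hn]
  · -- n < 0, |n| previously seen, |n| new max
    obtain ⟨hn, hc, hl⟩ := h2
    have habs : |n| = -n := abs_of_neg hn
    have hnegpre : -n ∈ pre := by rw [← habs]; exact (hmem |n|).mp hc
    refine ⟨hmem', by omega, Or.inr ⟨n, by simp, by omega, by simp [hnegpre], rfl⟩, ?_⟩
    intro m hm hm0 hmneg
    simp only [List.mem_append, List.mem_singleton] at hm hmneg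
    rcases hm with hm | hm
    · rcases hmneg with hmn | hmn
      · have := hub m hm hm0 hmn; omega
      · have : m = -n := by omega
        subst this; rw [abs_neg]
    · subst hm; omega
  · -- no update
    refine ⟨hmem', hpos, ?_, ?_⟩
    · rcases hex with h | ⟨m, hm, hm0, hmneg, hr⟩
      · exact Or.inl h
      · exact Or.inr ⟨m, by simp [hm], hm0, by simp [hmneg], hr⟩
    · have hkey : -n ∈ pre → n ≠ 0 → |n| ≤ largest := by
        intro hkpre hk0
        have hcnt : (0 - n) ∈ count := by rw [hmem]; simpa using hkpre
        by_cases hn : n > 0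
        · have : ¬ n > largest := fun h => h1 ⟨hn, hcnt, h⟩
          rw [abs_of_pos hn]; omega
        · have hn' : n < 0 := by omega
          have habs : |n| = -n := abs_of_neg hn'
          have hcnt' : |n| ∈ count := by rw [habs, hmem]; simpa using hkpre
          have : ¬ |n| > largest := fun h => h2 ⟨hn', hcnt', h⟩
          omega
      intro m hm hm0 hmneg
      simp only [List.mem_append, List.mem_singleton] at hm hmneg
      rcases hm with hm | hm
      · rcases hmneg with hmn | hmn
        · exact hub m hm hm0 hmn
        · have hmn' : m = -n := by omega
          subst hmn'
          rw [abs_neg]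
          exact hkey (by simpa using hm) (by omega)
      · subst hm
        rcases hmneg with hmn | hmn
        · exact hkey hmn hm0
        · exfalso; omega

theorem foldA_good : ∀ (l pre : List Int) (count : PySem.Set Int) (largest : Int),
    (∀ m, m ∈ count ↔ m ∈ pre) → GoodAns pre largest →
    GoodAns (pre ++ l) (l.foldl solutionStep (count, largest)).2 := by
  intro l
  induction l with
  | nil => intro pre count largest hm hg; simpa using hg
  | cons n t ih =>
    intro pre count largest hm hg
    have hstep := goodAns_step n hm hg
    have : pre ++ n :: t = (pre ++ [n]) ++ t := by simp
    rw [this, List.foldl_cons]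
    have := ih (pre ++ [n]) (solutionStep (count, largest) n).1 (solutionStep (count, largest) n).2 hstep.1 hstep.2
    simpa using this

theorem goodAns_A (A : List Int) : GoodAns A (solution A) := by
  unfold solution
  have := foldA_good A [] PySem.Set.empty 0 (by intro m; simp [PySem.Set.empty]) ⟨le_refl 0, Or.inl rfl, by intro n h; simp at h⟩
  simpa using this

-- ---- B-side: the two-pointer scan on a strictly increasing list is GoodAns ----

-- strict monotonicity of indexing
theorem getD_lt_of_lt {vals : List Int} (hs : List.Pairwise (· < ·) vals)
    {p q : Nat} (hpq : p < q) (hq : q < vals.length) :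
    vals.getD p 0 < vals.getD q 0 := by
  rw [List.getD_eq_getElem _ _ (by omega), List.getD_eq_getElem _ _ hq]
  exact List.pairwise_iff_getElem.mp hs p q (by omega) hq hpq

theorem twoPtr_good (vals : List Int) (hs : List.Pairwise (· < ·) vals) :
    ∀ (fuel i j : Nat), j - i ≤ fuel → j < vals.length →
    (∀ p q, p < q → q < vals.length → vals.getD p 0 + vals.getD q 0 = 0 → i ≤ p ∧ q ≤ j) →
    GoodAns vals (twoPtr vals i j) := by
  have hmemD : ∀ k, k < vals.length → vals.getD k 0 ∈ vals := by
    intro k hk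
    rw [List.getD_eq_getElem _ _ hk]
    exact List.getElem_mem hk
  -- index of an element
  have hidx : ∀ n : Int, n ∈ vals → ∃ k, k < vals.length ∧ vals.getD k 0 = n := by
    intro n hn
    obtain ⟨k, hk, hv⟩ := List.getElem_of_mem hn
    exact ⟨k, hk, by rw [List.getD_eq_getElem _ _ hk]; exact hv⟩
  -- a pair (n, -n) with n ≠ 0 gives indices p < q with sum 0 and vals[q] = |n|
  have hpair : ∀ n : Int, n ∈ vals → n ≠ 0 → -n ∈ vals →
      ∃ p q, p < q ∧ q < vals.length ∧ vals.getD p 0 + vals.getD q 0 = 0 ∧ vals.getD q 0 = |n| := by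
    intro n hn hn0 hneg
    have habsmem : |n| ∈ vals := by rcases abs_choice n with h | h <;> rw [h] <;> assumption
    have hnegmem : -|n| ∈ vals := by
      rcases abs_choice n with h | h
      · rw [h]; exact hneg
      · rw [h]; simpa using hn
    obtain ⟨q, hq, hvq⟩ := hidx |n| habsmem
    obtain ⟨p, hp, hvp⟩ := hidx (-|n|) hnegmem
    have habs0 : (0:Int) < |n| := abs_pos.mpr hn0
    have hplq : p < q := by
      by_contra h
      rcases Nat.lt_or_ge q p with h' | h'
      · have := getD_lt_of_lt hs h' hp; omega
      · have : p = q := by omega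
        subst this; omega
    exact ⟨p, q, hplq, hq, by omega, hvq⟩
  intro fuel
  induction fuel with
  | zero =>
    intro i j hf hj hinv
    have hij : ¬ i < j := by omega
    rw [twoPtr, dif_neg hij]
    refine ⟨le_refl 0, Or.inl rfl, ?_⟩
    intro n hn hn0 hneg
    obtain ⟨p, q, hpq, hq, hsum, _⟩ := hpair n hn hn0 hneg
    have := hinv p q hpq hq hsum
    omega
  | succ f ih =>
    intro i j hf hj hinv
    by_cases hij : i < j
    · rw [twoPtr, dif_pos hij]
      simp only []
      by_cases h0 : vals.getD i 0 + vals.getD j 0 = 0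
      · rw [if_pos h0]
        have hij' := getD_lt_of_lt hs hij hj
        have hjpos : 0 < vals.getD j 0 := by omega
        refine ⟨by omega, Or.inr ⟨vals.getD j 0, ?_, by omega, ?_, (abs_of_pos hjpos).symm⟩, ?_⟩
        · exact hmemD j (by omega)
        · have : -vals.getD j 0 = vals.getD i 0 := by omega
          rw [this]; exact hmemD i (by omega)
        · intro n hn hn0 hneg
          obtain ⟨p, q, hpq, hq, hsum, hvq⟩ := hpair n hn hn0 hneg
          have hqj : q ≤ j := (hinv p q hpq hq hsum).2
          rcases Nat.lt_or_ge q j with h | h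
          · have := getD_lt_of_lt hs h hj; omega
          · have : q = j := by omega
            subst this; omega
      · rw [if_neg h0]
        by_cases hneg : vals.getD i 0 + vals.getD j 0 < 0
        · rw [if_pos hneg]
          refine ih (i+1) j (by omega) hj ?_
          intro p q hpq hq hsum
          have h1 := hinv p q hpq hq hsum
          refine ⟨?_, h1.2⟩
          rcases Nat.eq_or_lt_of_le h1.1 with h | h
          · exfalso
            subst h
            have hql : vals.getD q 0 ≤ vals.getD j 0 := by
              rcases Nat.lt_or_ge q j with h' | h'
              · have := getD_lt_of_lt hs h' hj; omega
              · have : q = j := by omega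
                subst this; omega
            omega
          · omega
        · rw [if_neg hneg]
          refine ih i (j-1) (by omega) (by omega) ?_
          intro p q hpq hq hsum
          have h1 := hinv p q hpq hq hsum
          refine ⟨h1.1, ?_⟩
          rcases Nat.eq_or_lt_of_le h1.2 with h | h
          · exfalso
            subst h
            have hpl : vals.getD i 0 ≤ vals.getD p 0 := by
              rcases Nat.lt_or_ge i p with h' | h'
              · have := getD_lt_of_lt hs h' (by omega); omega
              · have : p = i := by omega
                subst this; omega
            omega
          · omega
    · rw [twoPtr, dif_neg hij]
      refine ⟨le_refl 0, Or.inl rfl, ?_⟩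
      intro n hn hn0 hneg
      obtain ⟨p, q, hpq, hq, hsum, _⟩ := hpair n hn hn0 hneg
      have := hinv p q hpq hq hsum
      omega

theorem goodAns_alt (A : List Int) : GoodAns A (solution_alt A) := by
  unfold solution_alt
  simp only []
  set vals := PySem.List.sorted (PySem.Set.ofList A) (fun x => x) false with hvals
  have hmemv : ∀ m : Int, m ∈ vals ↔ m ∈ A := by
    intro m
    rw [hvals]
    simp [PySem.List.mem_sorted, PySem.Set.mem_ofList]
  have hs : List.Pairwise (· < ·) vals := by
    rw [hvals]; exact PySem.List.sorted_ofList_pairwise_lt (xs := A)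
  refine goodAns_congr hmemv ?_
  rcases Nat.eq_zero_or_pos vals.length with h | h
  · have hnil : vals = [] := List.length_eq_zero_iff.mp h
    rw [hnil]
    rw [twoPtr]
    exact ⟨le_refl 0, Or.inl rfl, by intro n hn; simp at hn⟩
  · refine twoPtr_good vals hs (vals.length - 1) 0 (vals.length - 1) (by omega) (by omega) ?_
    intro p q hpq hq _
    omega

-- ===== VERDICT (by name: the statement is the Claim_ definition above) =====
theorem solution_spec : Claim_equal_solution := by
  intro A _
  unfold Spec_solution
  exact goodAns_unique (goodAns_A A) (goodAns_alt A)
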